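-- pv_equiv track=rewrite | github.com/itchono/Comrade | src/Comrade/components/fun/fun_cmds.py | owoify
-- ===== SOURCE A (Python) =====
-- def owoify(t):
--     '''
--     Replaces L, R, with w
--     '''
--     remove_characters = ["R", "L", "r", "l"]
--     for character in remove_characters:
--         if character.islower():
--             t = t.replace(character, "w")
--         else:
--             t = t.replace(character, "W")
--     return t
-- ===== SOURCE B (Python) =====
-- def owoify(t):
--     '''
--     Replaces L, R, with w
--     '''
--     return t.translate(str.maketrans("RLrl", "WWww"))
-- ===== Notes on version B (the rewrite author's own statement) =====
-- stated objective: idiomatic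
-- what changed: B makes a single pass over the string with a fixed 4-entry translation table (str.translate/maketrans) instead of A's four successive full-string replace passes.
import Mathlib
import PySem

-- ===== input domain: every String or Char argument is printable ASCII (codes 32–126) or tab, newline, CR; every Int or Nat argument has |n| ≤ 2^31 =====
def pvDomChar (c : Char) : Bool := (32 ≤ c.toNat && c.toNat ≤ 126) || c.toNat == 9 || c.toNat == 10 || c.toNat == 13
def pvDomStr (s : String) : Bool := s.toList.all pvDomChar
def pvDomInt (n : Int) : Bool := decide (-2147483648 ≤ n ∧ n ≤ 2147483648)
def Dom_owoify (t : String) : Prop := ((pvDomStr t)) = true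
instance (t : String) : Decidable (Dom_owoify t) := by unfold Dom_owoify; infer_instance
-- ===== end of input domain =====

-- B replaces A's four full-string replace passes with one pass through a fixed
-- translation table (str.translate); return values are identical on all strings.

-- ===== PORT A =====
-- Python str.islower() for a string: at least one cased character and no upper-case
-- cased character; exact on the ASCII domain (only called on "R","L","r","l" here).
def pyStrIslower (s : String) : Bool :=
  s.toList.any PySem.Chars.islower && s.toList.all (fun c => !(PySem.Chars.isupper c))

def owoify (t : String) : String :=
  (["R", "L", "r", "l"] : List String).foldl
    (fun t character =>
      if pyStrIslower character then PySem.Str.replace t character "w"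
      else PySem.Str.replace t character "W") t

-- ===== PORT B =====
-- translation table of str.maketrans("RLrl", "WWww"), applied char by char in one pass
def owoTable (c : Char) : Char :=
  if c == 'R' || c == 'L' then 'W'
  else if c == 'r' || c == 'l' then 'w'
  else c

def owoify_alt (t : String) : String :=
  String.ofList (t.toList.map owoTable)

-- ===== PRECONDITION & SPEC =====
def Spec_owoify (t : String) (out : String) : Prop := out = owoify_alt t
instance (t : String) (out : String) : Decidable (Spec_owoify t out) := by unfold Spec_owoify; infer_instance

-- ===== CLAIM (what is proved, stated in full; the proofs are below) =====
def Claim_equal_owoify : Prop := ∀ (t : String), Dom_owoify t → Spec_owoify t (owoify t)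

-- ===== LEMMAS AND PROOFS =====

-- replacing one single character by another maps the substitution over the list
theorem replace_go_single (a b : Char) (l acc : List Char) :
    PySem.Chars.replace.go [a] [b] l.length l acc
      = acc.reverse ++ l.map (fun c => if c = a then b else c) := by
  induction l generalizing acc with
  | nil => simp [PySem.Chars.replace.go]
  | cons c t ih =>
    by_cases h : c = a
    · subst h
      simpa [PySem.Chars.replace.go, List.isPrefixOf] using ih (b :: acc)
    · have : List.isPrefixOf [a] (c :: t) = false := by
        simp [List.isPrefixOf]; exact fun hc => (h hc.symm).elim
      simpa [PySem.Chars.replace.go, this, h] using ih (c :: acc)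

theorem replace_single (a b : Char) (l : List Char) :
    PySem.Chars.replace l [a] [b] = l.map (fun c => if c = a then b else c) := by
  simpa [PySem.Chars.replace] using replace_go_single a b l []

theorem owoTable_comp (c : Char) :
    ((fun c => if c = 'l' then 'w' else c) ∘ (fun c => if c = 'r' then 'w' else c) ∘
      (fun c => if c = 'L' then 'W' else c) ∘ (fun c => if c = 'R' then 'W' else c)) c
      = owoTable c := by
  simp only [Function.comp]
  by_cases h1 : c = 'R' <;> by_cases h2 : c = 'L' <;>
    by_cases h3 : c = 'r' <;> by_cases h4 : c = 'l' <;>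
    simp_all [owoTable]

-- ===== VERDICT (by name: the statement is the Claim_ definition above) =====
theorem owoify_spec : Claim_equal_owoify := by
  intro t _
  simp only [Spec_owoify]
  have hR : pyStrIslower "R" = false := rfl
  have hL : pyStrIslower "L" = false := rfl
  have hr : pyStrIslower "r" = true := rfl
  have hl : pyStrIslower "l" = true := rfl
  have e : owoify t = PySem.Str.replace (PySem.Str.replace (PySem.Str.replace
      (PySem.Str.replace t "R" "W") "L" "W") "r" "w") "l" "w" := by
    simp only [owoify, List.foldl, hR, hL, hr, hl, if_true, if_false, Bool.false_eq_true]
  have htl : (owoify t).toList = (owoify_alt t).toList := by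
    rw [e]
    simp only [PySem.Str.toList_replace,
      show ("R" : String).toList = ['R'] from rfl, show ("L" : String).toList = ['L'] from rfl,
      show ("r" : String).toList = ['r'] from rfl, show ("l" : String).toList = ['l'] from rfl,
      show ("W" : String).toList = ['W'] from rfl, show ("w" : String).toList = ['w'] from rfl]
    rw [replace_single, replace_single, replace_single, replace_single,
      List.map_map, List.map_map, List.map_map]
    have h2 : (owoify_alt t).toList = t.toList.map owoTable := by
      simp [owoify_alt, String.toList_ofList]
    rw [h2]
    exact List.map_congr_left (fun c _ => owoTable_comp c)
  calc owoify t = String.ofList (owoify t).toList := (String.ofList_toList).symm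
    _ = String.ofList (owoify_alt t).toList := by rw [htl]
    _ = owoify_alt t := String.ofList_toList
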